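-- pv_equiv track=rewrite | github.com/owen-keating/CSCI-1133 | hw10/hw10.py | bigram_count
-- ===== SOURCE A (Python) =====
-- def bigram_count(string):
--     '''
--     Purpose: To analyze a string of words and determine which words most frequently follow other words.
--     Input Parameter(s):
--         string: a given string of words.
--     Return Value: A dictionary of words, each paired with its own dictionary representing how frequently other words follow it.
--     '''
--     dict = {}
--     list = string.split()
--     for i in range(len(list)-1):
--         try:
--             x = dict[list[i]]
--             try:
--                 x[list[i+1]]+=1
--             except KeyError:
--                 x[list[i+1]]=1
--             dict[list[i]] = x
--         except KeyError:
--             dict[list[i]] = {list[i+1]:1}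
--     return dict
-- ===== SOURCE B (Python) =====
-- def bigram_count(string):
--     words = string.split()
--     followers = {}
--     for w, nxt in zip(words, words[1:]):
--         followers.setdefault(w, []).append(nxt)
--     return {w: {f: fl.count(f) for f in dict.fromkeys(fl)} for w, fl in followers.items()}
-- ===== Notes on version B (the rewrite author's own statement) =====
-- stated objective: simpler
-- what changed: A counts bigrams inline with nested try/except dict updates in one indexed loop; B first groups followers per word via zip(words, words[1:]) and setdefault, then builds each inner frequency dict by counting the follower list in a second pass.
import Mathlib
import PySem

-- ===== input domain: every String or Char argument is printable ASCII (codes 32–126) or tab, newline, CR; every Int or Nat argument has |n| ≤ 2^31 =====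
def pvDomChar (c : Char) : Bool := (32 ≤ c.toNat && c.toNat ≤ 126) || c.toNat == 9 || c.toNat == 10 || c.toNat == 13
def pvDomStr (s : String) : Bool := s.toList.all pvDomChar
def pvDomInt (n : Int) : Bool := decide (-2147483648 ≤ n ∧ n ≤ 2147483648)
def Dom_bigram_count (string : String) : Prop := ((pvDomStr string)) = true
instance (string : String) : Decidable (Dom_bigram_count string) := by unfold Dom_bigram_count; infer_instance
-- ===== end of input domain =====

-- B replaces A's inline try/except nested counting with a group-then-count two-pass decomposition (simpler).

-- ===== PORT A =====
-- one iteration of A's for-loop: try/except KeyError lookups become matches on Dict.get?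
def bigramAStep (ws : List String) (d : PySem.Dict String (PySem.Dict String Int)) (i : Int) :
    PySem.Dict String (PySem.Dict String Int) :=
  let w := PySem.List.pyGetD ws i ""
  let n := PySem.List.pyGetD ws (i + 1) ""
  match d.get? w with
  | some x =>
      let x' := match x.get? n with
        | some v => x.insert n (v + 1)
        | none => x.insert n 1
      d.insert w x'
  | none => d.insert w (PySem.Dict.ofList [(n, 1)])

def bigram_count (string : String) : List (String × List (String × Int)) :=
  let ws := PySem.Str.split₀ string
  ((PySem.List.pyRange 0 ((ws.length : Int) - 1) 1).foldl (bigramAStep ws) PySem.Dict.empty).items.map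
    (fun p => (p.1, p.2.items))

-- ===== PORT B =====
def bigram_count_alt (string : String) : List (String × List (String × Int)) :=
  let words := PySem.Str.split₀ string
  let followers := (words.zip (PySem.List.slice words (some 1) none)).foldl
    (fun d p => d.modify p.1 [] (· ++ [p.2])) PySem.Dict.empty   -- setdefault(w, []).append(nxt)
  followers.items.map
    (fun p => (p.1, (PySem.List.dedup p.2).map (fun f => (f, (p.2.count f : Int)))))

-- ===== PRECONDITION & SPEC =====
def Spec_bigram_count (string : String) (out : List (String × List (String × Int))) : Prop := out = bigram_count_alt string
instance (string : String) (out : List (String × List (String × Int))) : Decidable (Spec_bigram_count string out) := by unfold Spec_bigram_count; infer_instance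

-- ===== CLAIM (what is proved, stated in full; the proofs are below) =====
def Claim_equal_bigram_count : Prop := ∀ (string : String), Dom_bigram_count string → Spec_bigram_count string (bigram_count string)

-- ===== LEMMAS AND PROOFS =====

-- the value-wise Counter image of a follower-list dict
def pvMapv (e : PySem.Dict String (List String)) : PySem.Dict String (PySem.Dict String Int) :=
  ⟨e.items.map (fun p => (p.1, PySem.Dict.counter p.2))⟩

theorem pvMapv_get? (e : PySem.Dict String (List String)) (w : String) :
    (pvMapv e).get? w = (e.get? w).map PySem.Dict.counter := by
  obtain ⟨l⟩ := e
  induction l with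
  | nil => rfl
  | cons p l ih =>
      by_cases h : p.1 == w
      · simp [pvMapv, PySem.Dict.get?, h]
      · simp [pvMapv, PySem.Dict.get?, List.find?_cons, h, List.find?_map,
          Function.comp_def, Option.map_map]

theorem pvMapv_contains (e : PySem.Dict String (List String)) (w : String) :
    (pvMapv e).contains w = e.contains w := by
  obtain ⟨l⟩ := e
  simp [pvMapv, PySem.Dict.contains, List.any_map, Function.comp_def]

theorem pvMapv_insert (e : PySem.Dict String (List String)) (w : String) (v : List String) :
    pvMapv (e.insert w v) = (pvMapv e).insert w (PySem.Dict.counter v) := by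
  simp only [PySem.Dict.insert, pvMapv_contains]
  by_cases h : e.contains w
  · simp only [h, if_true, pvMapv, List.map_map]
    congr 1
    apply List.map_congr_left
    intro p _
    by_cases hp : p.1 = w <;> simp [hp]
  · simp [h, pvMapv]

theorem pvMapv_getD (e : PySem.Dict String (List String)) (w : String) :
    (pvMapv e).getD w PySem.Dict.empty = PySem.Dict.counter (e.getD w []) := by
  simp only [PySem.Dict.getD, pvMapv_get?]
  cases e.get? w <;> rfl

-- A's loop body is exactly "modify the inner counter"
theorem bigramAStep_eq_modify (ws : List String) (d : PySem.Dict String (PySem.Dict String Int)) (i : Int) :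
    bigramAStep ws d i
      = d.modify (PySem.List.pyGetD ws i "") PySem.Dict.empty
          (fun x => x.modify (PySem.List.pyGetD ws (i + 1) "") 0 (· + 1)) := by
  simp only [bigramAStep, PySem.Dict.modify, PySem.Dict.getD, PySem.Dict.ofList, PySem.Dict.update]
  cases hd : d.get? (PySem.List.pyGetD ws i "") with
  | none =>
      simp only [Option.getD]
      cases he : (PySem.Dict.empty (κ := String) (ν := Int)).get? (PySem.List.pyGetD ws (i + 1) "") with
      | none => rfl
      | some v => simp [PySem.Dict.empty, PySem.Dict.get?] at he
  | some x =>
      simp only [Option.getD]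
      cases hx : x.get? (PySem.List.pyGetD ws (i + 1) "") with
      | none => simp
      | some v => simp

-- the loop over pairs preserves the Counter image
theorem pvFold_inv (l : List (String × String)) (e : PySem.Dict String (List String)) :
    l.foldl
        (fun d p => d.modify p.1 PySem.Dict.empty (fun x => x.modify p.2 0 (· + 1)))
        (pvMapv e)
      = pvMapv (l.foldl (fun d p => d.modify p.1 [] (· ++ [p.2])) e) := by
  induction l generalizing e with
  | nil => rfl
  | cons p l ih =>
      simp only [List.foldl_cons]
      rw [show (pvMapv e).modify p.1 PySem.Dict.empty (fun x => x.modify p.2 0 (· + 1))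
            = pvMapv (e.modify p.1 [] (· ++ [p.2])) from ?_, ih]
      simp only [PySem.Dict.modify, pvMapv_getD, pvMapv_insert,
        PySem.Dict.counter_append_singleton]

-- A's indexed loop reads exactly the adjacent pairs of ws
theorem pvPairs_eq (ws : List String) :
    (List.range (ws.length - 1)).map (fun k => (ws.getD k "", ws.getD (k + 1) ""))
      = ws.zip (ws.drop 1) := by
  apply List.ext_getElem
  · simp [List.length_zip]
  · intro i h1 h2
    have hlen : i < ws.length - 1 := by simpa using h1
    simp [List.getElem_zip, List.getD_eq_getElem?_getD,
      (by omega : i < ws.length), (by omega : i + 1 < ws.length)]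

theorem pvRangeFold_eq (ws : List String) :
    (List.range (ws.length - 1)).foldl
        (fun d k => d.modify (ws.getD k "") PySem.Dict.empty
          (fun x => x.modify (ws.getD (k + 1) "") 0 (· + 1))) PySem.Dict.empty
      = pvMapv ((ws.zip (ws.drop 1)).foldl
          (fun d p => d.modify p.1 [] (· ++ [p.2])) PySem.Dict.empty) := by
  rw [← pvFold_inv, ← pvPairs_eq, List.foldl_map]
  rfl

theorem bigram_count_eq_alt (string : String) : bigram_count string = bigram_count_alt string := by
  simp only [bigram_count, bigram_count_alt]
  rw [PySem.List.slice_from _ (by norm_num), Int.toNat_one]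
  set ws := PySem.Str.split₀ string with hws
  have hrange : PySem.List.pyRange 0 ((ws.length : Int) - 1) 1
      = List.map (fun k : Nat => (k : Int)) (List.range (ws.length - 1)) := by
    rcases ws with _ | ⟨w, ws'⟩
    · rfl
    · rw [show ((List.length (w :: ws') : Int) - 1) = ((List.length (w :: ws') - 1 : Nat) : Int) by
        rw [Nat.cast_sub (by simp)]; norm_num]
      exact PySem.List.pyRange_zero_natCast _
  rw [hrange, List.foldl_map]
  have hstep : (fun (d : PySem.Dict String (PySem.Dict String Int)) (k : Nat) =>
        bigramAStep ws d (k : Int))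
      = fun d k => d.modify (ws.getD k "") PySem.Dict.empty
          (fun x => x.modify (ws.getD (k + 1) "") 0 (· + 1)) := by
    funext d k
    rw [bigramAStep_eq_modify]
    rw [show ((k : Int) + 1) = ((k + 1 : Nat) : Int) by omega]
    rw [PySem.List.pyGetD_natCast, PySem.List.pyGetD_natCast]
  rw [hstep, pvRangeFold_eq]
  simp only [pvMapv, List.map_map]
  apply List.map_congr_left
  intro p _
  simp [Function.comp, PySem.Dict.items_counter, PySem.List.dedup_eq_ofList]

-- ===== VERDICT (by name: the statement is the Claim_ definition above) =====
theorem bigram_count_spec : Claim_equal_bigram_count := by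
  intro s _
  exact bigram_count_eq_alt s
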